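-- pv_equiv track=rewrite | github.com/nyjc-computing-2425/assignment-5b-xint0n9 | main.py | sum_by_year
-- ===== SOURCE A (Python) =====
-- def sum_by_year(enrolment):
--     # Type your code below
--     """
--     returns a list of list consisting the total enrolment each year
--     """
--     total_enrol = []
--     for i in range(35):
--         total_enrol.append([1984+i,0])
--         for line in enrolment:
--             if line[0] == 1984+i:
--                 total_enrol[i][1] = total_enrol[i][1]+line[-1]
--     return total_enrol
-- ===== SOURCE B (Python) =====
-- def sum_by_year(enrolment):
--     """
--     returns a list of list consisting the total enrolment each year
--     """
--     totals = [0] * 35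
--     for line in enrolment:
--         year = line[0]
--         if 1984 <= year <= 2018:
--             totals[year - 1984] += line[-1]
--     return [[1984 + i, totals[i]] for i in range(35)]
-- ===== Notes on version B (the rewrite author's own statement) =====
-- stated objective: alternative
-- what changed: A scans the whole enrolment list once per year (35 full passes, rebuilding each row by repeated in-place updates); B makes a single pass accumulating totals into a 35-slot year-indexed array and then emits the 35 rows (intended as faster; measured only ~1.25x at the largest size).
import Mathlib
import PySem

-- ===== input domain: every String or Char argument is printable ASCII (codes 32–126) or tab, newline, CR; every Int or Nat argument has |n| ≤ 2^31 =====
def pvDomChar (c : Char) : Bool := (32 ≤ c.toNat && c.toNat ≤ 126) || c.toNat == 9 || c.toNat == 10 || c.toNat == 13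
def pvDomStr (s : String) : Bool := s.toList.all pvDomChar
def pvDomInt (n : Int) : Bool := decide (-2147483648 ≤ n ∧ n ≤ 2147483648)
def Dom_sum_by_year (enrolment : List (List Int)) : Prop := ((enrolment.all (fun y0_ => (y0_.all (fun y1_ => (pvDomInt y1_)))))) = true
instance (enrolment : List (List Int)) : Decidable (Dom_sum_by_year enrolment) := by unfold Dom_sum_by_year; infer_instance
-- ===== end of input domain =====

-- B replaces A's 35 full scans of the input by one scan accumulating into a 35-slot
-- year-indexed list, then builds the 35 rows (alternative algorithm; same return value
-- wherever A returns).

-- ===== PORT A =====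
def sum_by_year (enrolment : List (List Int)) : List (List Int) :=
  (PySem.List.pyRange 0 35).foldl
    (fun total_enrol i =>
      enrolment.foldl
        (fun acc line =>
          if (PySem.List.pyGet? line 0).getD 0 = 1984 + i then
            PySem.List.pySetD acc i
              [1984 + i,
                PySem.List.pyGetD (PySem.List.pyGetD acc i []) 1 0
                  + (PySem.List.pyGet? line (-1)).getD 0]
          else acc)
        (total_enrol ++ [[1984 + i, 0]]))
    []

-- ===== PORT B =====
def sum_by_year_alt (enrolment : List (List Int)) : List (List Int) :=
  let totals := enrolment.foldl
    (fun t line =>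
      let y := (PySem.List.pyGet? line 0).getD 0
      if 1984 ≤ y ∧ y ≤ 2018 then
        PySem.List.pySetD t (y - 1984)
          (PySem.List.pyGetD t (y - 1984) 0 + (PySem.List.pyGet? line (-1)).getD 0)
      else t)
    (List.replicate 35 0)
  (PySem.List.pyRange 0 35).map (fun i => [1984 + i, PySem.List.pyGetD totals i 0])

-- ===== PRECONDITION & SPEC =====
-- Pre_ excludes inputs containing an empty inner list, on which Python A (line[0])
-- raises IndexError (B raises there too).
def Pre_sum_by_year (enrolment : List (List Int)) : Prop :=
  ∀ line ∈ enrolment, line ≠ []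
instance (enrolment : List (List Int)) : Decidable (Pre_sum_by_year enrolment) := by
  unfold Pre_sum_by_year; infer_instance
def pvWitness_sum_by_year : List (List Int) := [[1984, 3], [2018, 5], [1990, 2, 7]]

def Spec_sum_by_year (enrolment : List (List Int)) (out : List (List Int)) : Prop := out = sum_by_year_alt enrolment
instance (enrolment : List (List Int)) (out : List (List Int)) : Decidable (Spec_sum_by_year enrolment out) := by unfold Spec_sum_by_year; infer_instance

-- ===== CLAIM (what is proved, stated in full; the proofs are below) =====
def Claim_equal_sum_by_year : Prop := ∀ (enrolment : List (List Int)), Dom_sum_by_year enrolment → Pre_sum_by_year enrolment → Spec_sum_by_year enrolment (sum_by_year enrolment)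

-- ===== LEMMAS AND PROOFS =====

def pvKey (line : List Int) : Int := (PySem.List.pyGet? line 0).getD 0
def pvVal (line : List Int) : Int := (PySem.List.pyGet? line (-1)).getD 0
-- the total enrolment recorded for year y
def pvSum (lines : List (List Int)) (y : Int) : Int :=
  (lines.map (fun line => if pvKey line = y then pvVal line else 0)).sum

lemma pvSum_nil (y : Int) : pvSum [] y = 0 := rfl

lemma pvSum_cons (line : List Int) (lines : List (List Int)) (y : Int) :
    pvSum (line :: lines) y
      = (if pvKey line = y then pvVal line else 0) + pvSum lines y := by
  simp [pvSum]

-- A's inner loop over the data, acting on the freshly appended row at index i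
lemma innerA (y i : Int) (lines prev : List (List Int)) (c : Int)
    (hi : i = (prev.length : Int)) :
    lines.foldl
      (fun acc line =>
        if (PySem.List.pyGet? line 0).getD 0 = y then
          PySem.List.pySetD acc i
            [y, PySem.List.pyGetD (PySem.List.pyGetD acc i []) 1 0
                  + (PySem.List.pyGet? line (-1)).getD 0]
        else acc)
      (prev ++ [[y, c]])
      = prev ++ [[y, c + pvSum lines y]] := by
  subst hi
  induction lines generalizing c with
  | nil => simp [pvSum_nil]
  | cons line lines ih =>
    rw [List.foldl_cons]
    by_cases h : (PySem.List.pyGet? line 0).getD 0 = y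
    · have hget : PySem.List.pyGetD (prev ++ [[y, c]]) (prev.length : Int) [] = [y, c] := by
        rw [PySem.List.pyGetD_natCast]
        simp [List.getD]
      have hgc : PySem.List.pyGetD [y, c] 1 0 = c := by
        simp [PySem.List.pyGetD, PySem.List.pyGet?, PySem.List.pyIdx?]
      have hset : PySem.List.pySetD (prev ++ [[y, c]]) (prev.length : Int)
          [y, c + (PySem.List.pyGet? line (-1)).getD 0]
          = prev ++ [[y, c + (PySem.List.pyGet? line (-1)).getD 0]] := by
        rw [PySem.List.pySetD_natCast]
        simp
      simp only [h, hget, hgc, if_pos]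
      rw [hset, ih, pvSum_cons, if_pos (show pvKey line = y by simpa [pvKey] using h)]
      simp [pvVal]
      ring
    · simp only [if_neg h]
      rw [ih, pvSum_cons, if_neg (show ¬ pvKey line = y by simpa [pvKey] using h)]
      simp

-- A's outer loop builds exactly the 35 rows [year, pvSum year]
lemma A_eq_map (enrolment : List (List Int)) :
    ∀ n : Nat,
    (PySem.List.pyRange 0 (n : Int)).foldl
      (fun total_enrol i =>
        enrolment.foldl
          (fun acc line =>
            if (PySem.List.pyGet? line 0).getD 0 = 1984 + i then
              PySem.List.pySetD acc i
                [1984 + i,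
                  PySem.List.pyGetD (PySem.List.pyGetD acc i []) 1 0
                    + (PySem.List.pyGet? line (-1)).getD 0]
            else acc)
          (total_enrol ++ [[1984 + i, 0]]))
      []
      = (PySem.List.pyRange 0 (n : Int)).map
          (fun i => [1984 + i, pvSum enrolment (1984 + i)]) := by
  intro n
  induction n with
  | zero => simp
  | succ n ih =>
    have h1 : ((n + 1 : Nat) : Int) = (n : Int) + 1 := by push_cast; ring
    rw [h1, PySem.List.pyRange_one_succ_right (by positivity), List.foldl_append,
        List.map_append, ih, List.foldl_cons, List.foldl_nil]
    have hlen : ((n : Int)) =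
        (((PySem.List.pyRange 0 (n : Int)).map
          (fun i => [1984 + i, pvSum enrolment (1984 + i)])).length : Int) := by
      simp [PySem.List.pyRange_zero_natCast]
    rw [innerA (1984 + (n : Int)) (n : Int) enrolment _ 0 hlen]
    simp

-- B's single pass: slot j of totals accumulates the year-(1984+j) total
lemma B_invariant :
    ∀ (lines : List (List Int)) (t : List Int), t.length = 35 → ∀ j : Nat, j < 35 →
    PySem.List.pyGetD
      (lines.foldl
        (fun t line =>
          let y := (PySem.List.pyGet? line 0).getD 0
          if 1984 ≤ y ∧ y ≤ 2018 then
            PySem.List.pySetD t (y - 1984)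
              (PySem.List.pyGetD t (y - 1984) 0 + (PySem.List.pyGet? line (-1)).getD 0)
          else t)
        t)
      (j : Int) 0
      = PySem.List.pyGetD t (j : Int) 0 + pvSum lines (1984 + (j : Int)) := by
  intro lines
  induction lines with
  | nil => intro t ht j hj; simp [pvSum_nil]
  | cons line lines ih =>
    intro t ht j hj
    rw [List.foldl_cons]
    set y := (PySem.List.pyGet? line 0).getD 0 with hy
    by_cases hrange : 1984 ≤ y ∧ y ≤ 2018
    · have hcast : y - 1984 = (((y - 1984).toNat : Nat) : Int) := by omega
      have hstep :
          (let y' := (PySem.List.pyGet? line 0).getD 0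
           if 1984 ≤ y' ∧ y' ≤ 2018 then
             PySem.List.pySetD t (y' - 1984)
               (PySem.List.pyGetD t (y' - 1984) 0 + (PySem.List.pyGet? line (-1)).getD 0)
           else t)
          = PySem.List.pySetD t ((((y - 1984).toNat : Nat) : Int))
              (PySem.List.pyGetD t ((((y - 1984).toNat : Nat) : Int)) 0
                + (PySem.List.pyGet? line (-1)).getD 0) := by
        simp only [← hy, if_pos hrange, ← hcast]
      rw [hstep, ih _ (by rw [PySem.List.length_pySetD]; exact ht) j hj,
          PySem.List.pyGetD_pySetD_natCast t _ j _ _ (by omega),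
          pvSum_cons]
      by_cases hj' : j = (y - 1984).toNat
      · have hkey : pvKey line = 1984 + (j : Int) := by simp [pvKey, ← hy]; omega
        rw [if_pos hj', if_pos hkey, ← hcast]
        have : ((j : Int)) = y - 1984 := by omega
        rw [this]
        simp [pvVal]
        ring
      · have hkey : ¬ pvKey line = 1984 + (j : Int) := by simp [pvKey, ← hy]; omega
        rw [if_neg hj', if_neg hkey]
        ring
    · have hstep :
          (let y' := (PySem.List.pyGet? line 0).getD 0
           if 1984 ≤ y' ∧ y' ≤ 2018 then
             PySem.List.pySetD t (y' - 1984)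
               (PySem.List.pyGetD t (y' - 1984) 0 + (PySem.List.pyGet? line (-1)).getD 0)
           else t) = t := by
        simp only [← hy, if_neg hrange]
      have hkey : ¬ pvKey line = 1984 + (j : Int) := by
        simp [pvKey, ← hy]; omega
      rw [hstep, ih t ht j hj, pvSum_cons, if_neg hkey]
      ring

-- ===== VERDICT (by name: the statement is the Claim_ definition above) =====
theorem sum_by_year_spec : Claim_equal_sum_by_year := by
  intro enrolment _ _
  unfold Spec_sum_by_year sum_by_year sum_by_year_alt
  have h35 : (35 : Int) = ((35 : Nat) : Int) := by norm_num
  rw [h35, A_eq_map enrolment 35]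
  apply List.map_congr_left
  intro i hi
  have hib := PySem.List.mem_pyRange_one.mp hi
  have hj : i = ((i.toNat : Nat) : Int) := by omega
  rw [hj, B_invariant enrolment (List.replicate 35 0) (by simp) i.toNat (by omega)]
  rw [PySem.List.pyGetD_natCast]
  simp only [List.getD_eq_getElem?_getD, List.getElem?_replicate]
  split <;> simp
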